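-- pv_equiv track=rewrite | github.com/bartoszmaleta/4_small_algorithms | check.py | get_odd_elements
-- ===== SOURCE A (Python) =====
-- def get_odd_elements(x, start):
--     """
--     Function should return a list containing first 'x' odd elements,
--     starting from 'start' value.
--
--     >>> get_odd_elements(2, 31)
--     [31, 33]
--
--     >>> get_odd_elements(3, 10)
--     [11, 13, 15]
-- ==
--     """
--     list_witihin_range_start_and_up = []
--     for number in range(start, 100):    # chagne to while loop, because of the range!
--         list_witihin_range_start_and_up.append(number)
--
--     list_with_odd_numbers = []
--
--     for elem in list_witihin_range_start_and_up:
--         if elem % 2 != 0: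
--             list_with_odd_numbers.append(elem)
--
--     first_x_elements_of_list_with_odd_numbers = list_with_odd_numbers[:x]
--     return first_x_elements_of_list_with_odd_numbers
-- ===== SOURCE B (Python) =====
-- def get_odd_elements(x, start):
--     first_odd = start if start % 2 != 0 else start + 1
--     return list(range(first_odd, 100, 2))[:x]
-- ===== Notes on version B (the rewrite author's own statement) =====
-- stated objective: simpler
-- what changed: Replaces the build-all-integers pass plus a separate %2-filter pass with a single strided range(first_odd, 100, 2) starting at the first odd value >= start, keeping the [:x] slice.
import Mathlib
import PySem

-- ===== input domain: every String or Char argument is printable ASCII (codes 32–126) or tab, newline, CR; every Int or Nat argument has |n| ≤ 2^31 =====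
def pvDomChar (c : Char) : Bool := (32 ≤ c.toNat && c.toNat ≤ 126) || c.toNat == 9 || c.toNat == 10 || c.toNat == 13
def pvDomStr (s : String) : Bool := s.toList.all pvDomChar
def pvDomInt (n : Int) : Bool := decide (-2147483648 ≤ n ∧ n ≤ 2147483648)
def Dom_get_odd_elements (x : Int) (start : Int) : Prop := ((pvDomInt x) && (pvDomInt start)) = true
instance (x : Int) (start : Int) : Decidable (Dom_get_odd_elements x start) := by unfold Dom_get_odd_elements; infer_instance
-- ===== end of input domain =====

-- B replaces A's two passes (collect range(start,100), then filter %2) with one strided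
-- range(first_odd, 100, 2); objective: simpler.

-- ===== PORT A =====
def get_odd_elements (x : Int) (start : Int) : List Int :=
  let list_witihin_range_start_and_up :=
    (PySem.List.pyRange start 100 1).foldl (fun acc number => acc ++ [number]) []
  let list_with_odd_numbers :=
    list_witihin_range_start_and_up.foldl
      (fun acc elem => if PySem.Int.mod elem 2 ≠ 0 then acc ++ [elem] else acc) []
  PySem.List.slice list_with_odd_numbers none (some x)

-- ===== PORT B =====
def get_odd_elements_alt (x : Int) (start : Int) : List Int :=
  let first_odd := if PySem.Int.mod start 2 ≠ 0 then start else start + 1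
  PySem.List.slice (PySem.List.pyRange first_odd 100 2) none (some x)

-- ===== PRECONDITION & SPEC =====
def Spec_get_odd_elements (x : Int) (start : Int) (out : List Int) : Prop := out = get_odd_elements_alt x start
instance (x : Int) (start : Int) (out : List Int) : Decidable (Spec_get_odd_elements x start out) := by unfold Spec_get_odd_elements; infer_instance

-- ===== CLAIM (what is proved, stated in full; the proofs are below) =====
def Claim_equal_get_odd_elements : Prop := ∀ (x : Int) (start : Int), Dom_get_odd_elements x start → Spec_get_odd_elements x start (get_odd_elements x start)

-- ===== LEMMAS AND PROOFS =====

-- generic cons/nil shape for a positive-step range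
theorem pyRange_pos_nil (a b s : Int) (hs : 0 < s) (hba : b ≤ a) :
    PySem.List.pyRange a b s = [] := by
  rw [PySem.List.pyRange_of_pos a b hs]
  simp [show ¬ a < b by omega]

theorem pyRange_pos_cons (a b s : Int) (hs : 0 < s) (hab : a < b) :
    PySem.List.pyRange a b s = a :: PySem.List.pyRange (a + s) b s := by
  rw [PySem.List.pyRange_of_pos a b hs, PySem.List.pyRange_of_pos (a + s) b hs]
  have h1 : (b - a + s - 1) / s = (b - (a + s) + s - 1) / s + 1 := by
    have := Int.add_mul_ediv_right (b - (a + s) + s - 1) 1 (by omega : s ≠ 0)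
    rw [show b - a + s - 1 = b - (a + s) + s - 1 + 1 * s by ring]
    omega
  by_cases h2 : a + s < b
  · have hq : 0 ≤ (b - (a + s) + s - 1) / s :=
      Int.ediv_nonneg (by omega) (by omega)
    simp only [if_pos hab, if_pos h2, h1]
    rw [show ((b - (a + s) + s - 1) / s + 1).toNat = ((b - (a + s) + s - 1) / s).toNat + 1 by omega]
    rw [List.range_succ_eq_map]
    simp only [List.map_cons, List.map_map]
    refine List.cons_eq_cons.mpr ⟨by push_cast; ring, List.map_congr_left (fun k _ => ?_)⟩
    simp only [Function.comp_apply]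
    push_cast
    ring
  · -- exactly one element
    have hq0 : (b - (a + s) + s - 1) / s = 0 :=
      Int.ediv_eq_zero_of_lt (by omega) (by omega)
    simp only [if_pos hab, if_neg h2, h1, hq0]
    simp

-- heart of the equivalence: filtering the odd values out of range(s,b) is the
-- strided range starting at the first odd value ≥ s
theorem filter_odd_pyRange (b : Int) : ∀ (n : Nat) (s : Int), (b - s).toNat = n →
    (PySem.List.pyRange s b 1).filter (fun e => decide (PySem.Int.mod e 2 ≠ 0)) =
      PySem.List.pyRange (if PySem.Int.mod s 2 ≠ 0 then s else s + 1) b 2 := by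
  intro n
  induction n with
  | zero =>
    intro s hn
    have hbs : b ≤ s := by omega
    rw [PySem.List.pyRange_one_eq_nil hbs, List.filter_nil]
    split_ifs with h
    · exact (pyRange_pos_nil s b 2 (by omega) hbs).symm
    · exact (pyRange_pos_nil (s + 1) b 2 (by omega) (by omega)).symm
  | succ m ih =>
    intro s hn
    have hsb : s < b := by omega
    rw [PySem.List.pyRange_one_cons hsb, List.filter_cons,
        ih (s + 1) (by omega)]
    have hmod : PySem.Int.mod s 2 = s % 2 := PySem.Int.mod_eq_emod_of_pos (by omega)
    have hmod1 : PySem.Int.mod (s + 1) 2 = (s + 1) % 2 := PySem.Int.mod_eq_emod_of_pos (by omega)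
    by_cases hodd : s % 2 = 0
    · -- s even: s dropped, first odd is s+1
      have h1 : (s + 1) % 2 ≠ 0 := by omega
      simp [hodd, h1]
    · -- s odd: s kept, next odd after s+1 is s+2
      have h1 : (s + 1) % 2 = 0 := by omega
      have c1 : decide (PySem.Int.mod s 2 ≠ 0) = true := by simp [hodd]
      have c2 : ¬ (PySem.Int.mod (s + 1) 2 ≠ 0) := by simp [h1]
      have c3 : PySem.Int.mod s 2 ≠ 0 := by simp [hodd]
      rw [if_pos c1, if_neg c2, if_pos c3, pyRange_pos_cons s b 2 (by omega) hsb,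
          show s + 1 + 1 = s + 2 from by ring]

-- ===== VERDICT (by name: the statement is the Claim_ definition above) =====
theorem get_odd_elements_spec : Claim_equal_get_odd_elements := by
  intro x start _
  unfold Spec_get_odd_elements get_odd_elements get_odd_elements_alt
  simp only [PySem.List.foldl_append_singleton_eq_map, List.nil_append, List.map_id',
    PySem.List.foldl_append_ite_eq_filter]
  rw [filter_odd_pyRange 100 (100 - start).toNat start rfl]
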